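-- pv_equiv track=rewrite | github.com/miniworld-crew/super-octo-eureka | build_data.py | rem_banned
-- ===== SOURCE A (Python) =====
-- def rem_banned(words):
--     out = []
--     for word in words:
--         stripped_word = word
--         for banned in ['\n', ',', '.', '!', '?', '"', '”', '“', '-', '—', ']', '[', ':', ';']:
--             stripped_word = stripped_word.replace(banned, '')
--         out.append(stripped_word.lower())
--     return out
-- ===== SOURCE B (Python) =====
-- def rem_banned(words):
--     banned = {'\n', ',', '.', '!', '?', '"', '\u201d', '\u201c', '-', '\u2014', ']', '[', ':', ';'}
--     return [''.join(c for c in word if c not in banned).lower() for word in words]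
-- ===== Notes on version B (the rewrite author's own statement) =====
-- stated objective: simpler
-- what changed: Replaces the inner loop of 14 whole-string .replace rewrites per word with a single character-filtering pass against a set of banned characters, built as a list comprehension.
import Mathlib
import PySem

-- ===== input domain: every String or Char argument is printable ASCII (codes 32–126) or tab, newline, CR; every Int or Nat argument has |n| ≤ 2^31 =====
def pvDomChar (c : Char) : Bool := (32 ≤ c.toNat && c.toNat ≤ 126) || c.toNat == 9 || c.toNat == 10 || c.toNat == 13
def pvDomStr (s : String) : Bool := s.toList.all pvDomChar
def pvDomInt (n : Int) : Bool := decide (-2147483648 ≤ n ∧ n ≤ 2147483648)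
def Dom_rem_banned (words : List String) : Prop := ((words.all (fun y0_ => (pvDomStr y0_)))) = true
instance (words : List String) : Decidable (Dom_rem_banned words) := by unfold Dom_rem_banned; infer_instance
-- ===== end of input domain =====

-- B replaces the inner loop of 14 whole-string .replace rewrites per word by a single
-- character-filtering pass against a set of the banned characters (objective: simpler).

-- ===== PORT A =====
def bannedStrs : List String := ["\n", ",", ".", "!", "?", "\"", "”", "“", "-", "—", "]", "[", ":", ";"]

def rem_banned (words : List String) : List String :=
  words.foldl (fun out word =>
    let stripped_word := bannedStrs.foldl (fun s banned => PySem.Str.replace s banned "") word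
    out ++ [PySem.Str.lower stripped_word]) []

-- ===== PORT B =====
def bannedSet : PySem.Set Char :=
  PySem.Set.ofList ['\n', ',', '.', '!', '?', '"', '”', '“', '-', '—', ']', '[', ':', ';']

def rem_banned_alt (words : List String) : List String :=
  words.map (fun word =>
    PySem.Str.lower (String.ofList (word.toList.filter (fun c => !(PySem.Set.contains bannedSet c)))))

-- ===== PRECONDITION & SPEC =====
def Spec_rem_banned (words : List String) (out : List String) : Prop := out = rem_banned_alt words
instance (words : List String) (out : List String) : Decidable (Spec_rem_banned words out) := by unfold Spec_rem_banned; infer_instance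

-- ===== CLAIM (what is proved, stated in full; the proofs are below) =====
def Claim_equal_rem_banned : Prop := ∀ (words : List String), Dom_rem_banned words → Spec_rem_banned words (rem_banned words)

-- ===== LEMMAS AND PROOFS =====

-- replace.go with a single-char pattern and empty replacement filters that char out
theorem replace_go_single (b : Char) :
    ∀ (l : List Char) (fuel : Nat) (acc : List Char), l.length ≤ fuel →
      PySem.Chars.replace.go [b] [] fuel l acc = acc.reverse ++ l.filter (fun c => !(c == b)) := by
  intro l
  induction l with
  | nil =>
      intro fuel acc _
      cases fuel <;> simp [PySem.Chars.replace.go]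
  | cons c t ih =>
      intro fuel acc hle
      cases fuel with
      | zero => simp at hle
      | succ fuel =>
        simp only [PySem.Chars.replace.go]
        by_cases hbc : c = b
        · subst hbc
          simp only [List.isPrefixOf, BEq.rfl, Bool.and_self, if_true,
            List.length_cons, List.length_nil, List.drop_succ_cons, List.drop_zero,
            List.reverse_nil, List.nil_append]
          rw [ih fuel _ (Nat.le_of_succ_le_succ hle)]
          simp
        · have : [b].isPrefixOf (c :: t) = false := by
            simp [List.isPrefixOf]
            exact fun h => hbc h.symm
          rw [this]
          simp only [Bool.false_eq_true, if_false]
          rw [ih fuel _ (Nat.le_of_succ_le_succ hle)]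
          simp [hbc]

theorem replace_single (cs : List Char) (b : Char) :
    PySem.Chars.replace cs [b] [] = cs.filter (fun c => !(c == b)) := by
  simp only [PySem.Chars.replace, List.isEmpty_cons, Bool.false_eq_true, if_false]
  simpa using replace_go_single b cs cs.length [] le_rfl

theorem foldl_replace_eq_filter (bs : List Char) :
    ∀ cs : List Char,
      bs.foldl (fun s b => PySem.Chars.replace s [b] []) cs
        = cs.filter (fun c => !(bs.contains c)) := by
  induction bs with
  | nil => intro cs; simp
  | cons b bs ih =>
      intro cs
      simp only [List.foldl_cons]
      rw [replace_single, ih, List.filter_filter]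
      apply List.filter_congr
      intro c _
      have hcb : (c == b) = decide (b = c) := by
        by_cases h : b = c <;> simp [h, Ne.symm]
      simp [hcb, Bool.and_comm, eq_comm]

theorem word_inner_eq (w : String) :
    bannedStrs.foldl (fun s banned => PySem.Str.replace s banned "") w
      = String.ofList (w.toList.filter (fun c => !(PySem.Set.contains bannedSet c))) := by
  apply String.toList_inj.mp
  have h : (bannedStrs.foldl (fun s banned => PySem.Str.replace s banned "") w).toList
      = ['\n', ',', '.', '!', '?', '"', '”', '“', '-', '—', ']', '[', ':', ';'].foldl
          (fun s b => PySem.Chars.replace s [b] []) w.toList := by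
    simp [bannedStrs, PySem.Str.toList_replace]
  rw [h, foldl_replace_eq_filter, String.toList_ofList]
  apply List.filter_congr
  intro c _
  rfl

theorem foldl_append_eq_map (f : String → String) (l : List String) :
    ∀ acc : List String, l.foldl (fun out w => out ++ [f w]) acc = acc ++ l.map f := by
  induction l with
  | nil => intro acc; simp
  | cons w l ih => intro acc; simp [ih]

-- ===== VERDICT (by name: the statement is the Claim_ definition above) =====
theorem rem_banned_spec : Claim_equal_rem_banned := by
  intro words _
  unfold Spec_rem_banned rem_banned rem_banned_alt
  rw [foldl_append_eq_map (fun w => PySem.Str.lower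
      (bannedStrs.foldl (fun s banned => PySem.Str.replace s banned "") w)) words []]
  simp only [List.nil_append]
  apply List.map_congr_left
  intro w _
  rw [word_inner_eq]
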